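-- pv_equiv track=rewrite | github.com/JerryMountak/AoC_2024 | Day09/disk_fragmenter.py | rearrange_files
-- ===== SOURCE A (Python) =====
-- from copy import deepcopy
--
-- def get_disk_status(disk_map):
--     tmp = deepcopy(disk_map)
--     filled = []
--     empty = []
--     last_ind = 0
--     for i,block in enumerate(tmp):
--         if i%2 == 0:
--             filled.append((last_ind,block,i//2))
--         else:
--             empty.append((last_ind,block))
--         last_ind += block
--
--     return filled,empty
--
-- def rearrange_files(disk_map):
--     files = deepcopy(disk_map)
--     filled, empty = get_disk_status(files)
--
--     for i,(ind,value,temp) in enumerate(filled[::-1]):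
--         for j,(id_e,count) in enumerate(empty):
--             if ind < id_e:
--                 break
--             elif value > count:
--                 continue
--             else:
--                 empty.pop(j)
--                 if value != count:
--                     empty.insert(j, (id_e+value, count-value))
--                 filled[len(filled)-i-1] = (id_e,value,temp)
--                 break
--
--     return filled
-- ===== SOURCE B (Python) =====
-- def rearrange_files(disk_map):
--     # Build file and free-span tables in one pass with a file-id counter and a
--     # boolean toggle, then place files right-to-left with a purely functional
--     # prefix/rest scan of the free list, building the result back-to-front.
--     filled = []
--     empty = []
--     pos = 0
--     fid = 0
--     is_file = True
--     for block in disk_map: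
--         if is_file:
--             filled.append((pos, block, fid))
--             fid += 1
--         else:
--             empty.append((pos, block))
--         pos += block
--         is_file = not is_file
--
--     out = []
--     for ind, value, f in reversed(filled):
--         prefix = []
--         rest = empty
--         placed = (ind, value, f)
--         while rest:
--             id_e, count = rest[0]
--             if ind < id_e:
--                 break
--             if value <= count:
--                 tail = rest[1:]
--                 if count != value:
--                     tail = [(id_e + value, count - value)] + tail
--                 empty = prefix + tail
--                 placed = (id_e, value, f)
--                 break
--             prefix = prefix + [(id_e, count)]
--             rest = rest[1:]
--         out.append(placed)
--     out.reverse()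
--     return out
-- ===== Notes on version B (the rewrite author's own statement) =====
-- stated objective: alternative
-- what changed: B replaces A's deepcopies, index-reversed in-place updates of filled (filled[len-i-1]=...) and the enumerate/pop/insert surgery on the free list by a single forward pass with a file-id counter and boolean toggle, and a purely functional right-to-left placement that threads the free list through a prefix/rest scan and builds the output back-to-front.
import Mathlib
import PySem

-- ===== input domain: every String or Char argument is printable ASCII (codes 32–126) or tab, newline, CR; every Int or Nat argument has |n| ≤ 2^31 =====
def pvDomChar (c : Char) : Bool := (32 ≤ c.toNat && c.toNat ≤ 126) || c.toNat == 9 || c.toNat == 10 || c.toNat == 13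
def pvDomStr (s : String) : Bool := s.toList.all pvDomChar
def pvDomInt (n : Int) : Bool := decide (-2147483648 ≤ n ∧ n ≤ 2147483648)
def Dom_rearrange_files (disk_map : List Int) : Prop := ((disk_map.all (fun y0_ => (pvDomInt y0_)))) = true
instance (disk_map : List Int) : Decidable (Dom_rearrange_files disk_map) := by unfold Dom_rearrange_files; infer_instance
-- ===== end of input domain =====

-- B restructures A (no deepcopy, single status pass with a toggle and file-id counter,
-- functional prefix/rest placement building the result back-to-front); same cost,
-- equal return value on every input.

-- ===== PORT A =====
-- loop body of get_disk_status: state (filled, empty, last_ind), p = (i, block)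
def statusStepA (st : List (Int × Int × Int) × List (Int × Int) × Int)
    (p : Int × Int) : List (Int × Int × Int) × List (Int × Int) × Int :=
  if PySem.Int.mod p.1 2 = 0 then
    (st.1 ++ [(st.2.2, p.2, PySem.Int.floordiv p.1 2)], st.2.1, st.2.2 + p.2)
  else
    (st.1, st.2.1 ++ [(st.2.2, p.2)], st.2.2 + p.2)

def getDiskStatus (disk_map : List Int) : List (Int × Int × Int) × List (Int × Int) :=
  let st := (PySem.List.enumerate disk_map 0).foldl statusStepA ([], [], 0)
  (st.1, st.2.1)

-- the inner 'for j,(id_e,count) in enumerate(empty)' with its break/continue logic: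
-- the chosen (j, id_e, count), or none when the loop ends or breaks without a fit
def innerA (ind value : Int) : List (Int × (Int × Int)) → Option (Int × Int × Int)
  | [] => none
  | (j, (id_e, count)) :: rest =>
    if ind < id_e then none
    else if value > count then innerA ind value rest
    else some (j, id_e, count)

-- empty.pop(j); if value != count: empty.insert(j, (id_e+value, count-value))
def applyA (empty : List (Int × Int)) (j id_e count value : Int) : List (Int × Int) :=
  let e1 := match PySem.List.pop? empty j with
    | some r => r.2
    | none => empty   -- unreachable: j is an index produced by enumerate(empty)
  if value ≠ count then PySem.List.insert e1 j (id_e + value, count - value) else e1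

-- one iteration of A's outer loop: p = (i, (ind, value, temp)) from enumerate(filled[::-1])
def stepA (st : List (Int × Int × Int) × List (Int × Int)) (p : Int × (Int × Int × Int)) :
    List (Int × Int × Int) × List (Int × Int) :=
  match innerA p.2.1 p.2.2.1 (PySem.List.enumerate st.2 0) with
  | none => st
  | some (j, id_e, count) =>
    (PySem.List.pySetD st.1 ((st.1.length : Int) - p.1 - 1) (id_e, p.2.2.1, p.2.2.2),
     applyA st.2 j id_e count p.2.2.1)

def rearrange_files (disk_map : List Int) : List (Int × Int × Int) :=
  let st := getDiskStatus disk_map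
  -- filled[::-1] is List.reverse (PySem.List.slice?_none_none_neg_one)
  ((PySem.List.enumerate st.1.reverse 0).foldl stepA (st.1, st.2)).1

-- ===== PORT B =====
-- loop body of B's status pass: state (filled, empty, pos, fid, is_file)
def buildStepB (st : List (Int × Int × Int) × List (Int × Int) × Int × Int × Bool)
    (block : Int) : List (Int × Int × Int) × List (Int × Int) × Int × Int × Bool :=
  if st.2.2.2.2 then
    (st.1 ++ [(st.2.2.1, block, st.2.2.2.1)], st.2.1, st.2.2.1 + block, st.2.2.2.1 + 1, false)
  else
    (st.1, st.2.1 ++ [(st.2.2.1, block)], st.2.2.1 + block, st.2.2.2.1, true)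

def buildB (disk_map : List Int) : List (Int × Int × Int) × List (Int × Int) × Int × Int × Bool :=
  disk_map.foldl buildStepB ([], [], 0, 0, true)

-- B's while loop over (prefix, rest): (new position, new free list) on success
def scanB (ind value : Int) (pre : List (Int × Int)) : List (Int × Int) → Option (Int × List (Int × Int))
  | [] => none
  | (id_e, count) :: rest =>
    if ind < id_e then none
    else if value ≤ count then
      some (id_e, pre ++ (if count ≠ value then (id_e + value, count - value) :: rest else rest))
    else scanB ind value (pre ++ [(id_e, count)]) rest

-- one iteration of B's placement loop: state (empty, out), f = (ind, value, fid)
def stepB (st : List (Int × Int) × List (Int × Int × Int)) (f : Int × Int × Int) :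
    List (Int × Int) × List (Int × Int × Int) :=
  match scanB f.1 f.2.1 [] st.1 with
  | none => (st.1, st.2 ++ [f])
  | some (p, e') => (e', st.2 ++ [(p, f.2.1, f.2.2)])

def rearrange_files_alt (disk_map : List Int) : List (Int × Int × Int) :=
  let st := buildB disk_map
  (st.1.reverse.foldl stepB (st.2.1, [])).2.reverse

-- ===== PRECONDITION & SPEC =====
def Spec_rearrange_files (disk_map : List Int) (out : List (Int × Int × Int)) : Prop := out = rearrange_files_alt disk_map
instance (disk_map : List Int) (out : List (Int × Int × Int)) : Decidable (Spec_rearrange_files disk_map out) := by unfold Spec_rearrange_files; infer_instance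

-- ===== CLAIM (what is proved, stated in full; the proofs are below) =====
def Claim_equal_rearrange_files : Prop := ∀ (disk_map : List Int), Dom_rearrange_files disk_map → Spec_rearrange_files disk_map (rearrange_files disk_map)

-- ===== LEMMAS AND PROOFS =====

-- status build: A's enumerate/i%2/i//2 loop equals B's toggle-and-counter loop
lemma build_aux (xs : List Int) : ∀ (F : List (Int × Int × Int)) (E : List (Int × Int))
    (pos fid : Int) (isf : Bool),
    (PySem.List.enumerate xs (if isf then 2 * fid else 2 * fid - 1)).foldl statusStepA (F, E, pos)
    = (let st := (xs.foldl buildStepB (F, E, pos, fid, isf)); (st.1, st.2.1, st.2.2.1)) := by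
  induction xs with
  | nil => intro F E pos fid isf; simp [PySem.List.enumerate_nil]
  | cons x xs ih =>
    intro F E pos fid isf
    rw [PySem.List.enumerate_cons]
    cases isf with
    | true =>
      simp only [List.foldl_cons, statusStepA, buildStepB]
      have := ih (F ++ [(pos, x, fid)]) E (pos + x) (fid + 1) false
      rw [show (2 * (fid + 1) - 1 : Int) = 2 * fid + 1 from by ring] at this
      simpa using this
    | false =>
      simp only [List.foldl_cons, statusStepA, buildStepB]
      have := ih F (E ++ [(pos, x)]) (pos + x) fid true
      rw [show (2 * fid : Int) = 2 * fid - 1 + 1 from by ring] at this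
      simpa using this
    
lemma build_eq (xs : List Int) : getDiskStatus xs = ((buildB xs).1, (buildB xs).2.1) := by
  have := build_aux xs [] [] 0 0 true
  simp only [getDiskStatus, buildB]
  norm_num at this
  rw [this]

-- inner scan: A's enumerate choice plus pop/insert surgery equals B's prefix/rest scan
lemma inner_bridge (ind value : Int) : ∀ (rest acc : List (Int × Int)),
    (match innerA ind value (PySem.List.enumerate rest (acc.length : Int)) with
     | none => scanB ind value acc rest = none
     | some (j, id_e, count) =>
         scanB ind value acc rest = some (id_e, applyA (acc ++ rest) j id_e count value)) := by
  intro rest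
  induction rest with
  | nil => intro acc; simp [PySem.List.enumerate_nil, innerA, scanB]
  | cons hd tl ih =>
    intro acc
    obtain ⟨id_e, count⟩ := hd
    rw [PySem.List.enumerate_cons]
    by_cases h1 : ind < id_e
    · simp [innerA, scanB, h1]
    · by_cases h2 : value > count
      · have h3 : ¬ value ≤ count := by omega
        have := ih (acc ++ [(id_e, count)])
        simp only [List.length_append, List.length_cons, List.length_nil] at this
        push_cast at this
        simp only [innerA, scanB, if_neg h1, if_pos h2, if_neg h3]
        simpa [List.append_assoc] using this
      · have h3 : value ≤ count := by omega
        simp only [innerA, scanB, if_neg h1, if_neg h2, if_pos h3]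
        have hlt : acc.length < (acc ++ (id_e, count) :: tl).length := by simp
        have hpop : PySem.List.pop? (acc ++ (id_e, count) :: tl) ((acc.length : Nat) : Int)
            = some (((id_e, count) : Int × Int), acc ++ tl) := by
          rw [PySem.List.pop?_natCast _ _ hlt]
          congr 1
          refine Prod.ext ?_ ?_
          · exact List.getElem_of_append rfl rfl
          · simp [List.eraseIdx_eq_take_drop_succ, List.drop_append]
        simp only [applyA, hpop]
        by_cases h4 : value = count
        · simp [h4]
        · have h5 : count ≠ value := fun h => h4 h.symm
          have h6 : value ≠ count := fun h => h4 h
          rw [if_pos h5, if_pos h6,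
            PySem.List.insert_natCast _ _ _ (by simp), List.take_left, List.drop_left]

-- outer loop: A's descending in-place writes equal B's appended outputs, reversed
lemma stepB_out (rs : List (Int × Int × Int)) : ∀ (E : List (Int × Int)) (out : List (Int × Int × Int)),
    rs.foldl stepB (E, out) = ((rs.foldl stepB (E, [])).1, out ++ (rs.foldl stepB (E, [])).2) := by
  induction rs with
  | nil => intro E out; simp
  | cons f rs ih =>
    intro E out
    simp only [List.foldl_cons]
    cases hs : scanB f.1 f.2.1 [] E with
    | none =>
      simp only [stepB, hs]
      rw [ih _ (out ++ [f]), ih _ ([] ++ [f])]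
      simp [List.append_assoc]
    | some r =>
      simp only [stepB, hs]
      rw [ih _ (out ++ [(r.1, f.2.1, f.2.2)]), ih _ ([] ++ [(r.1, f.2.1, f.2.2)])]
      simp [List.append_assoc]

lemma outer_eq (rs : List (Int × Int × Int)) : ∀ (F : List (Int × Int × Int)) (E : List (Int × Int)),
    rs.length ≤ F.length → F.take rs.length = rs.reverse →
    ((PySem.List.enumerate rs ((F.length : Int) - rs.length)).foldl stepA (F, E)).1
      = (rs.foldl stepB (E, [])).2.reverse ++ F.drop rs.length := by
  induction rs with
  | nil => intro F E _ _; simp [PySem.List.enumerate_nil]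
  | cons x rs ih =>
    intro F E hlen htake
    have hlt : rs.length < F.length := by simpa using hlen
    have htake' : F.take rs.length = rs.reverse := by
      have : (F.take (rs.length + 1)).take rs.length = (rs.reverse ++ [x]).take rs.length := by
        rw [show F.take (rs.length + 1) = rs.reverse ++ [x] from by simpa using htake]
      simpa [List.take_take, List.take_left' (by simp : rs.reverse.length = rs.length)]
        using this
    have hget : F[rs.length]'hlt = x := by
      rw [List.getElem_eq_iff hlt]
      have h2 : F.take (rs.length + 1) = rs.reverse ++ [x] := by simpa using htake
      have h3 : (F.take (rs.length + 1))[rs.length]? = F[rs.length]? := by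
        rw [List.getElem?_take, if_pos (by omega)]
      rw [← h3, h2, List.getElem?_append_right (by simp)]
      simp
    rw [PySem.List.enumerate_cons, List.foldl_cons]
    have hbridge := inner_bridge x.1 x.2.1 E []
    simp only [List.nil_append, List.length_nil, Nat.cast_zero] at hbridge
    cases hi : innerA x.1 x.2.1 (PySem.List.enumerate E 0) with
    | none =>
      rw [hi] at hbridge
      have hstep : stepA (F, E) ((F.length : Int) - ((x :: rs).length : Int), x) = (F, E) := by
        simp only [stepA, hi]
      rw [hstep]
      have hidx : ((F.length : Int) - ((x :: rs).length : Int)) + 1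
          = (F.length : Int) - (rs.length : Int) := by simp only [List.length_cons]; push_cast; omega
      rw [hidx, ih F E (le_of_lt hlt) htake']
      simp only [List.foldl_cons, stepB, hbridge]
      rw [stepB_out rs E ([] ++ [x])]
      simp only [List.nil_append, List.reverse_cons, List.cons_append]
      rw [List.drop_eq_getElem_cons hlt, hget]
      simp
    | some r =>
      obtain ⟨j, id_e, count⟩ := r
      rw [hi] at hbridge
      have hstep : stepA (F, E) ((F.length : Int) - ((x :: rs).length : Int), x)
          = (F.set rs.length (id_e, x.2.1, x.2.2), applyA E j id_e count x.2.1) := by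
        simp only [stepA, hi]
        rw [show (F.length : Int) - ((F.length : Int) - ((x :: rs).length : Int)) - 1
            = ((rs.length : Nat) : Int) from by simp only [List.length_cons]; push_cast; omega]
        rw [PySem.List.pySetD_natCast]
      rw [hstep]
      have hlen2 : (F.set rs.length (id_e, x.2.1, x.2.2)).length = F.length := by simp
      have hidx : ((F.length : Int) - ((x :: rs).length : Int)) + 1
          = (((F.set rs.length (id_e, x.2.1, x.2.2)).length : Int) - (rs.length : Int)) := by
        rw [hlen2]; simp only [List.length_cons]; push_cast; omega
      rw [hidx, ih (F.set rs.length (id_e, x.2.1, x.2.2)) (applyA E j id_e count x.2.1)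
        (by rw [hlen2]; exact le_of_lt hlt)
        (by rw [List.take_set_of_le (le_refl _), htake'])]
      simp only [List.foldl_cons, stepB, hbridge]
      rw [stepB_out rs (applyA E j id_e count x.2.1) ([] ++ [(id_e, x.2.1, x.2.2)])]
      simp only [List.nil_append, List.reverse_cons, List.cons_append]
      rw [List.drop_eq_getElem_cons (by rw [hlen2]; exact hlt)]
      rw [List.drop_set_of_lt (by omega)]
      simp

-- ===== VERDICT (by name: the statement is the Claim_ definition above) =====
theorem rearrange_files_spec : Claim_equal_rearrange_files := by
  intro disk_map _
  unfold Spec_rearrange_files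
  unfold rearrange_files rearrange_files_alt
  rw [build_eq]
  have h := outer_eq ((buildB disk_map).1.reverse) (buildB disk_map).1 (buildB disk_map).2.1
    (by simp) (by simp)
  simp only [List.length_reverse, sub_self, List.drop_length, List.append_nil] at h
  exact h
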